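-- pv_equiv track=rewrite | github.com/HardW0rker/Smekalov_Lab | Lab 2/Лаба_2_Часть_2_3.py | Creating_pairs
-- ===== SOURCE A (Python) =====
-- def Creating_pairs(a):
--     max_elem = a[0][0]
--     for i in range(len(a)):
--         for j in range(len(a[i] )):
--              if a[i][j] > max_elem:
--                    max_elem =  a[i][j]
--
--     list_index_max =[ (i,j) for i in range(len(a))  for j in range(len(a[i])) if a[i][j]  == max_elem]
--     line, column = list_index_max[0]
--     return [line,column,max_elem]
-- ===== SOURCE B (Python) =====
-- def Creating_pairs(a):
--     max_elem = a[0][0]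
--     line = 0
--     column = 0
--     for i, row in enumerate(a):
--         for j, v in enumerate(row):
--             if v > max_elem:
--                 max_elem = v
--                 line, column = i, j
--     return [line, column, max_elem]
-- ===== Notes on version B (the rewrite author's own statement) =====
-- stated objective: simpler
-- what changed: One fused pass that tracks the running max together with its first position, instead of A's two phases (max scan, then building the full list of all matching index pairs and taking its head).
import Mathlib
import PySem

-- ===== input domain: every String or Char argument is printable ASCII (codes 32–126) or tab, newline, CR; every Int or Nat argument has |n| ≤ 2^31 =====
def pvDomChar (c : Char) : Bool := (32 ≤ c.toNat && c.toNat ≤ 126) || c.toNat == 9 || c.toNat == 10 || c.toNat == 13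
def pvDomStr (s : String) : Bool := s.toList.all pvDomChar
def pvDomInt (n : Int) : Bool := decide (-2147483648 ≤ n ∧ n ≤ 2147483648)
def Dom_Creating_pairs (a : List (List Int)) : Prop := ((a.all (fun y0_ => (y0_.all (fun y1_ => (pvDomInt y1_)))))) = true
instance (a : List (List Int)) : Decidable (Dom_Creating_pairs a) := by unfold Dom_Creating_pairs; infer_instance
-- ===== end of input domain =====

-- B is a single fused pass tracking the running max with its first position,
-- replacing A's two phases (max scan, then list of all matching index pairs, take head).
-- Equivalence is about the return value; neither version mutates its argument.

-- ===== PORT A =====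
def Creating_pairs (a : List (List Int)) : List Int :=
  match (PySem.List.pyGet? a 0).bind (fun r => PySem.List.pyGet? r 0) with
  | none => []          -- a[0][0] raises IndexError; excluded by Pre_
  | some a00 =>
    -- for i in range(len(a)): for j in range(len(a[i])): if a[i][j] > max_elem: max_elem = a[i][j]
    let max_elem : Int := a.foldl (fun m row => row.foldl (fun m v => if v > m then v else m) m) a00
    -- list_index_max = [(i,j) for i … for j … if a[i][j] == max_elem]
    let list_index_max : List (Int × Int) :=
      (PySem.List.enumerate a).flatMap (fun ir =>
        (PySem.List.enumerate ir.2).filterMap (fun jv =>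
          if jv.2 = max_elem then some (ir.1, jv.1) else none))
    match list_index_max with
    | [] => []          -- list_index_max[0] would raise; unreachable under Pre_
    | (line, column) :: _ => [line, column, max_elem]

-- ===== PORT B =====
def Creating_pairs_alt (a : List (List Int)) : List Int :=
  match (PySem.List.pyGet? a 0).bind (fun r => PySem.List.pyGet? r 0) with
  | none => []          -- a[0][0] raises IndexError; excluded by Pre_
  | some a00 =>
    let s : Int × Int × Int :=
      (PySem.List.enumerate a).foldl (fun s ir =>
        (PySem.List.enumerate ir.2).foldl (fun s jv =>
          if jv.2 > s.1 then (jv.2, ir.1, jv.1) else s) s) (a00, 0, 0)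
    [s.2.1, s.2.2, s.1]

-- ===== PRECONDITION & SPEC =====
-- Pre_ excludes exactly the inputs where Python A raises IndexError at a[0][0]
-- (a empty, or its first row empty); B raises there identically.
def Pre_Creating_pairs (a : List (List Int)) : Prop := a.headD [] ≠ []
instance (a : List (List Int)) : Decidable (Pre_Creating_pairs a) := by unfold Pre_Creating_pairs; infer_instance
def pvWitness_Creating_pairs : List (List Int) := [[1, 3], [3, 2]]
def Spec_Creating_pairs (a : List (List Int)) (out : List Int) : Prop := out = Creating_pairs_alt a
instance (a : List (List Int)) (out : List Int) : Decidable (Spec_Creating_pairs a out) := by unfold Spec_Creating_pairs; infer_instance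

-- ===== CLAIM (what is proved, stated in full; the proofs are below) =====
def Claim_equal_Creating_pairs : Prop := ∀ (a : List (List Int)), Dom_Creating_pairs a → Pre_Creating_pairs a → Spec_Creating_pairs a (Creating_pairs a)

-- ===== LEMMAS AND PROOFS =====

-- row-major flattening of the matrix, with (i, j) index pairs
def pvFlat (a : List (List Int)) : List ((Int × Int) × Int) :=
  (PySem.List.enumerate a).flatMap (fun ir =>
    (PySem.List.enumerate ir.2).map (fun jv => ((ir.1, jv.1), jv.2)))

def pvMStep (m : Int) (x : (Int × Int) × Int) : Int := if x.2 > m then x.2 else m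
def pvStep (s : Int × Int × Int) (x : (Int × Int) × Int) : Int × Int × Int :=
  if x.2 > s.1 then (x.2, x.1) else s

theorem pvMFold_le (l : List ((Int × Int) × Int)) (m : Int) : m ≤ l.foldl pvMStep m := by
  induction l generalizing m with
  | nil => simp
  | cons x t ih =>
    refine le_trans ?_ (ih (pvMStep m x))
    simp only [pvMStep]; split <;> omega

theorem pvFold_fst (l : List ((Int × Int) × Int)) (m : Int) (p : Int × Int) :
    (l.foldl pvStep (m, p)).1 = l.foldl pvMStep m := by
  induction l generalizing m p with
  | nil => rfl
  | cons x t ih =>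
    simp only [List.foldl_cons, pvStep, pvMStep]
    split <;> exact ih _ _

theorem pvFold_snd_eq (l : List ((Int × Int) × Int)) (m : Int) (p : Int × Int)
    (h : l.foldl pvMStep m = m) : (l.foldl pvStep (m, p)).2 = p := by
  induction l generalizing m p with
  | nil => rfl
  | cons x t ih =>
    have hx : ¬ x.2 > m := by
      intro hgt
      have h1 : (pvMStep m x) ≤ t.foldl pvMStep (pvMStep m x) := pvMFold_le _ _
      simp only [List.foldl_cons] at h
      simp only [pvMStep, if_pos hgt] at h1 h
      omega
    simp only [List.foldl_cons, pvStep, pvMStep, if_neg hx] at h ⊢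
    exact ih _ _ h

theorem pvFold_snd_gt (l : List ((Int × Int) × Int)) (m : Int) (p : Int × Int)
    (h : m < l.foldl pvMStep m) :
    (l.filter (fun x => x.2 = l.foldl pvMStep m)).head?.map (·.1) =
      some (l.foldl pvStep (m, p)).2 := by
  induction l generalizing m p with
  | nil => simp at h
  | cons x t ih =>
    simp only [List.foldl_cons] at h ⊢
    by_cases hx : x.2 > m
    · simp only [pvStep, pvMStep, if_pos hx] at h ⊢
      by_cases hM : x.2 = t.foldl pvMStep x.2
      · rw [List.filter_cons_of_pos (by simpa using hM)]
        simp only [List.head?_cons, Option.map_some]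
        have h2 := pvFold_snd_eq t x.2 x.1 hM.symm
        rw [h2]
      · have hlt : x.2 < t.foldl pvMStep x.2 :=
          lt_of_le_of_ne (pvMFold_le t x.2) hM
        rw [List.filter_cons_of_neg (by simpa using hM)]
        exact ih x.2 x.1 hlt
    · simp only [pvStep, pvMStep, if_neg hx] at h ⊢
      have hne : ¬ (x.2 = t.foldl pvMStep m) := by
        have := pvMFold_le t m
        omega
      rw [List.filter_cons_of_neg (by simpa using hne)]
      exact ih m p h

-- A's nested max loop over rows equals the max fold over the flattening
theorem pvMax_flat (a : List (List Int)) (m : Int) :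
    a.foldl (fun m row => row.foldl (fun m v => if v > m then v else m) m) m
      = (pvFlat a).foldl pvMStep m := by
  rw [pvFlat, List.foldl_flatMap]
  conv_lhs => rw [← PySem.List.map_snd_enumerate a 0]
  rw [List.foldl_map]
  apply PySem.List.foldl_congr_mem
  intro acc ir _
  rw [List.foldl_map]
  conv_lhs => rw [← PySem.List.map_snd_enumerate ir.2 0]
  rw [List.foldl_map]
  rfl

-- B's nested loop equals the pvStep fold over the flattening
theorem pvAlt_flat (a : List (List Int)) (s : Int × Int × Int) :
    (PySem.List.enumerate a).foldl (fun s ir =>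
        (PySem.List.enumerate ir.2).foldl (fun s jv =>
          if jv.2 > s.1 then (jv.2, ir.1, jv.1) else s) s) s
      = (pvFlat a).foldl pvStep s := by
  rw [pvFlat, List.foldl_flatMap]
  apply PySem.List.foldl_congr_mem
  intro acc ir _
  rw [List.foldl_map]
  rfl

-- turn A's conditional filterMap into filter-then-map
theorem pvFilterMap_ite (i M : Int) (l : List (Int × Int)) :
    l.filterMap (fun jv => if jv.2 = M then some (i, jv.1) else none)
      = (l.filter (fun jv => jv.2 = M)).map (fun jv => (i, jv.1)) := by
  induction l with
  | nil => rfl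
  | cons x t ih =>
    by_cases hx : x.2 = M
    · rw [List.filterMap_cons, List.filter_cons_of_pos (by simpa using hx)]
      simp only [if_pos hx, List.map_cons, ih]
    · rw [List.filterMap_cons, List.filter_cons_of_neg (by simpa using hx)]
      simp only [if_neg hx, ih]

-- A's index comprehension is the filter of the flattening, projected to positions
theorem pvIdx_flat (a : List (List Int)) (M : Int) :
    (PySem.List.enumerate a).flatMap (fun ir =>
        (PySem.List.enumerate ir.2).filterMap (fun jv =>
          if jv.2 = M then some (ir.1, jv.1) else none))
      = ((pvFlat a).filter (fun x => x.2 = M)).map (·.1) := by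
  rw [pvFlat, List.filter_flatMap, List.map_flatMap]
  refine List.flatMap_congr (fun ir _ => ?_)
  rw [List.filter_map, List.map_map, pvFilterMap_ite]
  rfl

-- the combined argmax claim, for a flat list whose head is ((0,0), v)
theorem pvHead_filter (v : Int) (rest : List ((Int × Int) × Int)) :
    ((((((0 : Int), (0 : Int)), v) :: rest).filter
        (fun x => x.2 = ((((0 : Int), (0 : Int)), v) :: rest).foldl pvMStep v)).head?.map (·.1))
      = some (((((0 : Int), (0 : Int)), v) :: rest).foldl pvStep (v, 0, 0)).2 := by
  rcases lt_or_eq_of_le (pvMFold_le ((((0 : Int), (0 : Int)), v) :: rest) v) with hlt | heq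
  · exact pvFold_snd_gt _ v (0, 0) hlt
  · rw [List.filter_cons_of_pos (by simp [← heq])]
    simp only [List.head?_cons, Option.map_some]
    rw [pvFold_snd_eq _ v (0, 0) heq.symm]

-- ===== VERDICT (by name: the statement is the Claim_ definition above) =====
theorem Creating_pairs_spec : Claim_equal_Creating_pairs := by
  intro a _ hPre
  unfold Pre_Creating_pairs at hPre
  obtain ⟨row, t, rfl⟩ : ∃ row t, a = row :: t := by
    cases a with
    | nil => simp at hPre
    | cons r t => exact ⟨r, t, rfl⟩
  obtain ⟨v, rt, rfl⟩ : ∃ v rt, row = v :: rt := by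
    cases row with
    | nil => simp at hPre
    | cons v rt => exact ⟨v, rt, rfl⟩
  show Creating_pairs _ = Creating_pairs_alt _
  unfold Creating_pairs Creating_pairs_alt
  have h00 : (PySem.List.pyGet? ((v :: rt) :: t) 0).bind (fun r => PySem.List.pyGet? r 0)
      = some v := by
    simp [PySem.List.pyGet?, PySem.List.pyIdx?]
  rw [h00]
  obtain ⟨rest, hflat⟩ : ∃ rest,
      pvFlat ((v :: rt) :: t) = ((((0 : Int), (0 : Int)), v) :: rest) := by
    refine ⟨(PySem.List.enumerate rt 1).map (fun jv => (((0 : Int), jv.1), jv.2))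
      ++ (PySem.List.enumerate t 1).flatMap (fun ir =>
          (PySem.List.enumerate ir.2).map (fun jv => ((ir.1, jv.1), jv.2))), ?_⟩
    simp [pvFlat, PySem.List.enumerate_cons]
  simp only [pvMax_flat, pvIdx_flat, pvAlt_flat, hflat]
  have hh := pvHead_filter v rest
  have hfst := pvFold_fst ((((0 : Int), (0 : Int)), v) :: rest) v (0, 0)
  cases hfl : List.filter
      (fun x => decide (x.2 = List.foldl pvMStep v ((((0 : Int), (0 : Int)), v) :: rest)))
      ((((0 : Int), (0 : Int)), v) :: rest) with
  | nil => rw [hfl] at hh; simp at hh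
  | cons p tl =>
    rw [hfl] at hh
    simp only [List.head?_cons, Option.map_some, Option.some.injEq] at hh
    obtain ⟨⟨li, co⟩, vv⟩ := p
    rw [List.map_cons]
    show [li, co, _] = _
    rw [← hh, ← hfst]
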